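-- pv_equiv track=rewrite | github.com/mrcaron/AoC2017 | day1-py/day1.py | finddupes
-- ===== SOURCE A (Python) =====
-- def finddupes(number, offset):
--     """Finds duplicate numbers by matching current idx with an offset"""
--     end = len(number)
--     dupes = []
--     for (idx1, val) in enumerate(number):
--         nval = int(val)
--         idx2 = (idx1 + offset) % end
--         if nval == int(number[idx2]):
--             dupes.append(nval)
--     return dupes
-- ===== SOURCE B (Python) =====
-- def finddupes(number, offset):
--     """Finds duplicate numbers by matching current idx with an offset"""
--     if not number:
--         return []
--     n = len(number)
--     positions = {}
--     for i, c in enumerate(number):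
--         positions.setdefault(c, set()).add(i)
--     matched = set()
--     for s in positions.values():
--         matched |= s & {(j - offset) % n for j in s}
--     return [int(number[i]) for i in sorted(matched)]
-- ===== Notes on version B (the rewrite author's own statement) =====
-- stated objective: alternative
-- what changed: B replaces A's per-element compare-at-modular-offset loop with a set-algebra algorithm: it first builds an index (char -> set of positions), then for each character intersects its position set with that set shifted by -offset mod n, unions the results, and finally emits the matched positions in sorted order.
import Mathlib
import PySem

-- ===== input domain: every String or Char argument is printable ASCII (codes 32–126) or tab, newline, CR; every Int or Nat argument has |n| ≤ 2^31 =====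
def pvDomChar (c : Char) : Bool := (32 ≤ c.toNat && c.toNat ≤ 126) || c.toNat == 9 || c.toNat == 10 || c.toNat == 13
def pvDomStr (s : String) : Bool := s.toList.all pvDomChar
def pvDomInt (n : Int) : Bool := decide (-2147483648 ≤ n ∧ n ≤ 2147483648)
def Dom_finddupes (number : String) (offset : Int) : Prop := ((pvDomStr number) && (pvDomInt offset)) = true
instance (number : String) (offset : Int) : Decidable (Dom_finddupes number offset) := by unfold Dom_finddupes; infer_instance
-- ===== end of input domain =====

-- B is a set-algebra alternative of similar cost: it indexes positions by character, intersects each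
-- position set with its own (-offset mod n)-shift, unions the results and emits them sorted.

-- int(c) for a single character string: exact when c is a decimal digit (guaranteed by Pre_).
def intOfDigit (c : Char) : Int := (c.toNat : Int) - 48

-- ===== PORT A =====
def finddupes (number : String) (offset : Int) : List Int :=
  let chars := number.toList
  let endLen : Int := chars.length
  (PySem.List.enumerate chars).foldl
    (fun dupes p =>
      let nval := intOfDigit p.2
      let idx2 := PySem.Int.mod (p.1 + offset) endLen
      -- number[idx2]: idx2 = (idx1+offset) % end lies in [0, end) whenever the loop runs,
      -- so the pyGetD default is never used
      if nval == intOfDigit (PySem.List.pyGetD chars idx2 '0') then dupes ++ [nval] else dupes)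
    []

-- ===== PORT B =====
def finddupes_alt (number : String) (offset : Int) : List Int :=
  let chars := number.toList
  if chars = [] then []
  else
    let n : Int := chars.length
    -- positions: char -> set of the indices where it occurs (positions.setdefault(c, set()).add(i))
    let positions : PySem.Dict Char (PySem.Set Int) :=
      (PySem.List.enumerate chars).foldl
        (fun d p => d.modify p.2 PySem.Set.empty (fun s => PySem.Set.add s p.1))
        PySem.Dict.empty
    -- matched |= s & {(j - offset) % n for j in s}
    let matched : PySem.Set Int :=
      positions.values.foldl
        (fun m s => PySem.Set.union m (PySem.Set.inter s
          (PySem.Set.ofList (s.map (fun j => PySem.Int.mod (j - offset) n)))))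
        PySem.Set.empty
    (PySem.List.sorted matched (fun x => x)).map
      (fun i => intOfDigit (PySem.List.pyGetD chars i '0'))

-- ===== PRECONDITION & SPEC =====
-- Pre_ excludes strings containing a non-digit character: there Python's int(val) raises ValueError in A.
def Pre_finddupes (number : String) (offset : Int) : Prop :=
  number.toList.all (fun c => c.isDigit) = true
instance (number : String) (offset : Int) : Decidable (Pre_finddupes number offset) := by
  unfold Pre_finddupes; infer_instance

def pvWitness_finddupes : String × Int := ("91212129", 1)

def Spec_finddupes (number : String) (offset : Int) (out : List Int) : Prop := out = finddupes_alt number offset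
instance (number : String) (offset : Int) (out : List Int) : Decidable (Spec_finddupes number offset out) := by unfold Spec_finddupes; infer_instance

-- ===== CLAIM (what is proved, stated in full; the proofs are below) =====
def Claim_equal_finddupes : Prop := ∀ (number : String) (offset : Int), Dom_finddupes number offset → Pre_finddupes number offset → Spec_finddupes number offset (finddupes number offset)

-- ===== LEMMAS AND PROOFS =====

-- the aligned-index match predicate both programs decide at index k
def matchAt (chars : List Char) (offset : Int) (k : Nat) : Bool :=
  chars.getD k '0' == chars.getD (PySem.Int.mod ((k : Int) + offset) (chars.length : Int)).toNat '0'

theorem intOfDigit_inj (a b : Char) : intOfDigit a = intOfDigit b ↔ a = b := by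
  simp only [intOfDigit, Char.ext_iff, ← UInt32.toNat_inj, Char.toNat]
  omega

theorem beq_intOfDigit (a b : Char) : (intOfDigit a == intOfDigit b) = (a == b) := by
  by_cases h : a = b
  · simp [h]
  · have h2 : intOfDigit a ≠ intOfDigit b := fun hh => h ((intOfDigit_inj a b).1 hh)
    simp [h, h2]

-- cancelling a cyclic shift: ((x - a) % n + a) % n = x for x in [0, n)
theorem shift_cancel (n a x : Int) (hx0 : 0 ≤ x) (hxn : x < n) :
    ((x - a) % n + a) % n = x := by
  have h1 : ((x - a) % n + a) % n = ((x - a) + a) % n := by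
    rw [Int.add_emod ((x - a) % n) a n, Int.emod_emod_of_dvd _ dvd_rfl, ← Int.add_emod]
  have h2 : x - a + a = x := by ring
  rw [h1, h2, Int.emod_eq_of_lt hx0 hxn]

-- membership in the position index built by B's first loop
theorem posGetD (l : List (Int × Char)) :
    ∀ (d : PySem.Dict Char (PySem.Set Int)) (c : Char) (j : Int),
      (j ∈ (l.foldl (fun d p => d.modify p.2 PySem.Set.empty (fun s => PySem.Set.add s p.1)) d).getD c PySem.Set.empty)
      ↔ j ∈ d.getD c PySem.Set.empty ∨ (j, c) ∈ l := by
  induction l with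
  | nil => intro d c j; simp
  | cons p l ih =>
    rcases p with ⟨a, b⟩
    intro d c j
    simp only [List.foldl_cons, ih, List.mem_cons, Prod.mk.injEq]
    by_cases h : c = b
    · subst h
      rw [PySem.Dict.getD_modify_self]
      simp only [PySem.Set.mem_add]
      tauto
    · rw [PySem.Dict.getD_modify_of_ne]
      · tauto
      · exact h

-- membership in B's second loop (union of per-character intersections)
theorem memFoldlUnion (g : PySem.Set Int → PySem.Set Int) (l : List (PySem.Set Int)) :
    ∀ (m : PySem.Set Int) (i : Int),
      (i ∈ l.foldl (fun m s => PySem.Set.union m (g s)) m) ↔ i ∈ m ∨ ∃ s ∈ l, i ∈ g s := by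
  induction l with
  | nil => intro m i; simp
  | cons s l ih =>
    intro m i
    simp only [List.foldl_cons, ih, PySem.Set.mem_union, List.mem_cons]
    constructor
    · rintro ((h | h) | ⟨t, ht, hi⟩)
      · tauto
      · exact Or.inr ⟨s, Or.inl rfl, h⟩
      · exact Or.inr ⟨t, Or.inr ht, hi⟩
    · rintro (h | ⟨t, (rfl | ht), hi⟩)
      · tauto
      · tauto
      · exact Or.inr ⟨t, ht, hi⟩

theorem nodupFoldlUnion (g : PySem.Set Int → PySem.Set Int) (l : List (PySem.Set Int)) :
    ∀ (m : PySem.Set Int), m.Nodup → (l.foldl (fun m s => PySem.Set.union m (g s)) m).Nodup := by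
  induction l with
  | nil => intro m hm; simpa using hm
  | cons s l ih =>
    intro m hm
    exact ih _ (PySem.Set.nodup_union m (g s) hm)

-- membership in enumerate(chars)
theorem memEnum (chars : List Char) (j : Int) (c : Char) :
    ((j, c) ∈ PySem.List.enumerate chars) ↔
      ∃ k : Nat, ∃ _h : k < chars.length, j = (k : Int) ∧ chars.getD k '0' = c := by
  rw [List.mem_iff_getElem]
  constructor
  · rintro ⟨k, hk, he⟩
    have hk' : k < chars.length := by simpa [PySem.List.length_enumerate] using hk
    rw [PySem.List.getElem_enumerate] at he
    refine ⟨k, hk', ?_, ?_⟩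
    · have := congrArg Prod.fst he; simpa using this.symm
    · have := congrArg Prod.snd he
      simp only at this
      rw [List.getD_eq_getElem chars '0' hk', this]
  · rintro ⟨k, hk, rfl, hc⟩
    refine ⟨k, by simpa [PySem.List.length_enumerate] using hk, ?_⟩
    rw [PySem.List.getElem_enumerate]
    rw [List.getD_eq_getElem chars '0' hk] at hc
    simp [hc]

-- the characterisation of B's matched set
theorem mem_matched (chars : List Char) (offset : Int) (hnpos : 0 < chars.length) (i : Int) :
    (i ∈ ((((PySem.List.enumerate chars).foldl
        (fun d p => d.modify p.2 PySem.Set.empty (fun s => PySem.Set.add s p.1))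
        PySem.Dict.empty).values).foldl
        (fun m s => PySem.Set.union m (PySem.Set.inter s
          (PySem.Set.ofList (s.map (fun j => PySem.Int.mod (j - offset) (chars.length : Int))))))
        PySem.Set.empty))
    ↔ ∃ k : Nat, ∃ _h : k < chars.length, i = (k : Int) ∧ matchAt chars offset k = true := by
  have hnIpos : (0 : Int) < (chars.length : Int) := by exact_mod_cast hnpos
  set enum := PySem.List.enumerate chars with henum
  set pos := enum.foldl (fun d p => d.modify p.2 PySem.Set.empty (fun s => PySem.Set.add s p.1)) PySem.Dict.empty with hpos
  have hnodupkeys : pos.keys.Nodup := by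
    rw [hpos]
    exact PySem.Dict.nodup_keys_foldl_modify_key enum (fun p => p.2) PySem.Set.empty
      (fun _ p s => PySem.Set.add s p.1) PySem.Dict.empty (by simp [PySem.Dict.keys_empty])
  have hkeys : pos.keys = PySem.Set.update ([] : List Char) (enum.map (fun p => p.2)) := by
    rw [hpos, PySem.Dict.keys_foldl_modify_key enum (fun p => p.2) PySem.Set.empty
      (fun _ p s => PySem.Set.add s p.1) PySem.Dict.empty, PySem.Dict.keys_empty]
  have hvalues := PySem.Dict.values_eq_map_keys pos hnodupkeys PySem.Set.empty
  have hSc : ∀ (c : Char) (j : Int), (j ∈ pos.getD c PySem.Set.empty) ↔ (j, c) ∈ enum := by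
    intro c j
    rw [hpos, posGetD]
    simp [PySem.Dict.getD_empty, PySem.Set.empty]
  rw [memFoldlUnion (fun s => PySem.Set.inter s
        (PySem.Set.ofList (s.map (fun j => PySem.Int.mod (j - offset) (chars.length : Int))))) pos.values]
  simp only [PySem.Set.empty, List.not_mem_nil, false_or]
  constructor
  · rintro ⟨s, hs, hmem⟩
    rw [hvalues] at hs
    obtain ⟨c, _hc, rfl⟩ := List.mem_map.mp hs
    rw [PySem.Set.mem_inter] at hmem
    obtain ⟨hiS, hshift⟩ := hmem
    rw [PySem.Set.mem_ofList] at hshift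
    obtain ⟨j, hjS, hji⟩ := List.mem_map.mp hshift
    rw [hSc] at hiS hjS
    obtain ⟨k, hk, rfl, hck⟩ := (memEnum chars i c).mp hiS
    obtain ⟨k', hk', rfl, hck'⟩ := (memEnum chars j c).mp hjS
    refine ⟨k, hk, rfl, ?_⟩
    have hkk' : PySem.Int.mod ((k : Int) + offset) (chars.length : Int) = (k' : Int) := by
      rw [PySem.Int.mod_eq_emod_of_pos hnIpos] at hji ⊢
      rw [← hji]
      exact shift_cancel _ offset _ (by positivity) (by exact_mod_cast hk')
    unfold matchAt
    rw [hkk']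
    simp only [Int.toNat_natCast, hck, hck', beq_self_eq_true]
  · rintro ⟨k, hk, rfl, hmatch⟩
    have hj0 : 0 ≤ PySem.Int.mod ((k : Int) + offset) (chars.length : Int) :=
      PySem.Int.mod_nonneg _ hnIpos
    have hjlt : PySem.Int.mod ((k : Int) + offset) (chars.length : Int) < (chars.length : Int) :=
      PySem.Int.mod_lt _ hnIpos
    set k2 : Nat := (PySem.Int.mod ((k : Int) + offset) (chars.length : Int)).toNat with hk2
    have hk2lt : k2 < chars.length := by omega
    have hk2cast : ((k2 : Nat) : Int) = PySem.Int.mod ((k : Int) + offset) (chars.length : Int) := by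
      omega
    unfold matchAt at hmatch
    have hceq : chars.getD k '0' = chars.getD k2 '0' := by
      rw [← hk2] at hmatch
      exact eq_of_beq hmatch
    set c : Char := chars.getD k '0' with hc
    refine ⟨pos.getD c PySem.Set.empty, ?_, ?_⟩
    · rw [hvalues]
      apply List.mem_map_of_mem
      rw [hkeys, PySem.Set.mem_update]
      right
      apply List.mem_map.mpr
      exact ⟨((k : Int), c), (memEnum chars (k : Int) c).mpr ⟨k, hk, rfl, rfl⟩, rfl⟩
    · rw [PySem.Set.mem_inter, PySem.Set.mem_ofList]
      constructor
      · exact (hSc c (k : Int)).mpr ((memEnum chars (k : Int) c).mpr ⟨k, hk, rfl, rfl⟩)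
      · apply List.mem_map.mpr
        refine ⟨(k2 : Int), ?_, ?_⟩
        · exact (hSc c (k2 : Int)).mpr ((memEnum chars (k2 : Int) c).mpr ⟨k2, hk2lt, rfl, hceq.symm⟩)
        · rw [PySem.Int.mod_eq_emod_of_pos hnIpos] at hk2cast ⊢
          have hsc := shift_cancel (chars.length : Int) (-offset) (k : Int)
            (by positivity) (by exact_mod_cast hk)
          rw [sub_neg_eq_add] at hsc
          rw [hk2cast, sub_eq_add_neg]
          exact hsc

-- filter-then-map over two index-parallel lists agree pointwise ⇒ equal results
theorem filtermap_parallel {α β γ : Type} (p : α → Bool) (q : β → Bool) (f : α → γ) (g : β → γ) :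
    ∀ (xs : List α) (ys : List β), xs.length = ys.length →
    (∀ k (hx : k < xs.length) (hy : k < ys.length),
        p xs[k] = q ys[k] ∧ f xs[k] = g ys[k]) →
    (xs.filter p).map f = (ys.filter q).map g := by
  intro xs
  induction xs with
  | nil =>
    intro ys hlen _
    cases ys with
    | nil => rfl
    | cons y ys => simp at hlen
  | cons x xs ih =>
    intro ys hlen hk
    cases ys with
    | nil => simp at hlen
    | cons y ys =>
      have h0 := hk 0 (by simp) (by simp)
      have hrest : (xs.filter p).map f = (ys.filter q).map g := by
        refine ih ys (by simpa using hlen) ?_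
        intro k hx hy
        simpa using hk (k + 1) (by simpa using hx) (by simpa using hy)
      simp only [List.getElem_cons_zero] at h0
      by_cases hq : q y = true
      · simp [h0.1, hq, h0.2, hrest]
      · simp [h0.1, hq, hrest]

theorem finddupes_eq (number : String) (offset : Int) :
    finddupes number offset = finddupes_alt number offset := by
  by_cases hnil : number.toList = []
  · simp [finddupes, finddupes_alt, hnil]
  · set chars := number.toList with hcs
    have hnpos : 0 < chars.length := by
      cases hh : chars with
      | nil => exact absurd hh hnil
      | cons a t => simp
    have hnIpos : (0 : Int) < (chars.length : Int) := by exact_mod_cast hnpos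
    -- A as filter-map over enumerate
    have hA : finddupes number offset =
        ((PySem.List.enumerate chars).filter
            (fun p => intOfDigit p.2 ==
              intOfDigit (PySem.List.pyGetD chars (PySem.Int.mod (p.1 + offset) (chars.length : Int)) '0'))).map
          (fun p => intOfDigit p.2) := by
      simp only [finddupes, ← hcs, PySem.List.foldl_append_if, List.nil_append]
    -- B as map over the sorted matched set
    have hB : finddupes_alt number offset =
        (PySem.List.sorted
          ((((PySem.List.enumerate chars).foldl
              (fun d p => d.modify p.2 PySem.Set.empty (fun s => PySem.Set.add s p.1))
              PySem.Dict.empty).values).foldl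
              (fun m s => PySem.Set.union m (PySem.Set.inter s
                (PySem.Set.ofList (s.map (fun j => PySem.Int.mod (j - offset) (chars.length : Int))))))
              PySem.Set.empty)
          (fun x => x)).map (fun i => intOfDigit (PySem.List.pyGetD chars i '0')) := by
      simp only [finddupes_alt, ← hcs, if_neg hnil]
    set matched := (((PySem.List.enumerate chars).foldl
        (fun d p => d.modify p.2 PySem.Set.empty (fun s => PySem.Set.add s p.1))
        PySem.Dict.empty).values).foldl
        (fun m s => PySem.Set.union m (PySem.Set.inter s
          (PySem.Set.ofList (s.map (fun j => PySem.Int.mod (j - offset) (chars.length : Int))))))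
        PySem.Set.empty with hmatched
    -- the sorted matched set is the increasing list of matching indices
    set ysI : List Int := ((List.range chars.length).filter (matchAt chars offset)).map
        (fun k : Nat => (k : Int)) with hysI
    have hnodupmatched : matched.Nodup := by
      rw [hmatched]
      exact nodupFoldlUnion _ _ _ (by simp [PySem.Set.empty])
    have hnodupys : ysI.Nodup := by
      rw [hysI]
      refine List.Nodup.map (fun a b h => by exact_mod_cast h) ?_
      exact List.Nodup.filter _ List.nodup_range
    have hperm : ysI.Perm matched := by
      rw [List.perm_ext_iff_of_nodup hnodupys hnodupmatched]
      intro a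
      rw [hmatched, mem_matched chars offset hnpos a, hysI]
      simp only [List.mem_map, List.mem_filter, List.mem_range]
      constructor
      · rintro ⟨k, ⟨hk, hm⟩, rfl⟩
        exact ⟨k, hk, rfl, hm⟩
      · rintro ⟨k, hk, rfl, hm⟩
        exact ⟨k, ⟨hk, hm⟩, rfl⟩
    have hpairwise : List.Pairwise (fun a b => (fun x : Int => x) a < (fun x : Int => x) b) ysI := by
      rw [hysI]
      refine List.pairwise_map.mpr (List.Pairwise.filter _ ?_)
      refine (List.pairwise_lt_range (n := chars.length)).imp ?_
      intro a b h
      show ((a : Nat) : Int) < ((b : Nat) : Int)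
      exact_mod_cast h
    have hsorted : PySem.List.sorted matched (fun x => x) = ysI :=
      PySem.List.sorted_eq_of_perm_of_pairwise_lt matched ysI (fun x => x) hperm hpairwise
    rw [hA, hB, hsorted, hysI, List.map_map]
    apply filtermap_parallel
    · simp [PySem.List.length_enumerate]
    · intro k hx hy
      have hk : k < chars.length := by simpa [PySem.List.length_enumerate] using hx
      have henumk : (PySem.List.enumerate chars)[k] = ((k : Int), chars[k]) := by
        rw [PySem.List.getElem_enumerate]; simp
      have hrangek : (List.range chars.length)[k]'hy = k := List.getElem_range hy
      have hj0 : 0 ≤ PySem.Int.mod ((k : Int) + offset) (chars.length : Int) :=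
        PySem.Int.mod_nonneg _ hnIpos
      have hcast : PySem.Int.mod ((k : Int) + offset) (chars.length : Int) =
          (((PySem.Int.mod ((k : Int) + offset) (chars.length : Int)).toNat : Nat) : Int) := by
        omega
      constructor
      · rw [henumk, hrangek]
        simp only [matchAt]
        rw [beq_intOfDigit, hcast, PySem.List.pyGetD_natCast, List.getD_eq_getElem chars '0' hk]
        simp only [Int.toNat_natCast]
      · rw [henumk, hrangek]
        simp only [Function.comp]
        rw [PySem.List.pyGetD_natCast, List.getD_eq_getElem chars '0' hk]

-- ===== VERDICT (by name: the statement is the Claim_ definition above) =====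
theorem finddupes_spec : Claim_equal_finddupes := by
  intro number offset _ _
  unfold Spec_finddupes
  exact finddupes_eq number offset
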